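-- pv_equiv track=rewrite | github.com/Utkarsh4430/steerduplex | src/eval/fdbv2/evaluate.py | _parse_score_tok
-- ===== SOURCE A (Python) =====
-- from typing import Any, Dict, List, Optional, Tuple
--
-- def _skip_wc(text: str, i: int) -> int:
--     while i < len(text) and text[i] in " \t\r\n,":
--         i += 1
--     return i
--
-- def _parse_score_tok(text: str, i: int) -> Tuple[Optional[str], int]:
--     n = len(text)
--     i = _skip_wc(text, i)
--     if i >= n:
--         return None, i
--     if text[i] == '"':
--         j = i + 1
--         while j < n and text[j] != '"':
--             if text[j] == "\\":
--                 j += 1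
--             j += 1
--         if j < n:
--             return text[i + 1:j], j + 1
--         return None, i
--     j = i
--     while j < n and text[j] not in ",[]{}:\n\r\t ":
--         j += 1
--     tok = text[i:j].strip()
--     return tok if tok else None, j
-- ===== SOURCE B (Python) =====
-- # One-pass state-machine tokenizer: a single scan with an explicit mode
-- # (separator-skip / quoted-string / bare-token) instead of three separate
-- # index loops.
-- def _parse_score_tok(text, i):
--     n = len(text)
--     WS = " \t\r\n,"
--     STOP = ",[]{}:\n\r\t "
--     state = 0          # 0 = skipping separators, 1 = inside quotes, 2 = bare token
--     esc = False
--     start = i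
--     j = i
--     while j < n:
--         c = text[j]
--         if state == 0:
--             if c in WS:
--                 pass
--             elif c == '"':
--                 state, start = 1, j
--             elif c in STOP:
--                 return None, j
--             else:
--                 state, start = 2, j
--         elif state == 1:
--             if esc:
--                 esc = False
--             elif c == "\\":
--                 esc = True
--             elif c == '"':
--                 return text[start + 1:j], j + 1
--         else:
--             if c in STOP:
--                 tok = text[start:j].strip()
--                 return (tok or None), j
--         j += 1
--     if state == 0:
--         return None, max(j, n)
--     if state == 1:
--         return None, start
--     tok = text[start:n].strip()
--     return (tok or None), n
-- ===== Notes on version B (the rewrite author's own statement) =====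
-- stated objective: alternative
-- what changed: Replaces A's three separate index loops (separator skip, skip-by-2 escape quote scan, bare-token scan) with a single-pass state machine over the characters carrying an explicit mode and escape flag.
import Mathlib
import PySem

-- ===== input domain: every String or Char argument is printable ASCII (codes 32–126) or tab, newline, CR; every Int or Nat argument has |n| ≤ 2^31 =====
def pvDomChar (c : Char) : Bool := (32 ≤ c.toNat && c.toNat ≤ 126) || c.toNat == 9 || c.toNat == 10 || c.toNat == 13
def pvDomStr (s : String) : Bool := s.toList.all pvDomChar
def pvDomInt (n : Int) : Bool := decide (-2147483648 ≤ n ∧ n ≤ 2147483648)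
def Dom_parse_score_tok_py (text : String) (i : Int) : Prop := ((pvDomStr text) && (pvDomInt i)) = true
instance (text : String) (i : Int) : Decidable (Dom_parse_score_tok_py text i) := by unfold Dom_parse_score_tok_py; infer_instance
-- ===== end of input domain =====

-- B replaces A's three separate index loops (separator skip, quote scan with
-- skip-by-2 escapes, bare-token scan) by a single-pass state machine; same cost,
-- different decomposition (objective: alternative).
-- In both ports the while loops recurse on a Nat fuel = (len - index).toNat, a
-- pure totality guard: with the loop's own `index < len` test kept, the fuel is
-- never exhausted before the Python loop's condition fails.

-- ===== PORT A =====
-- _skip_wc: while i < len(text) and text[i] in " \t\r\n,": i += 1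
def pvSkipWC (cs : List Char) : Nat → Int → Int
  | 0, i => i
  | fuel + 1, i =>
    if i < (cs.length : Int) ∧ PySem.List.pyGetD cs i ' ' ∈ ([' ', '\t', '\r', '\n', ','] : List Char) then
      pvSkipWC cs fuel (i + 1)
    else i

-- while j < n and text[j] != '"': if text[j] == "\\": j += 1; j += 1
def pvQScan (cs : List Char) : Nat → Int → Int
  | 0, j => j
  | fuel + 1, j =>
    if j < (cs.length : Int) ∧ PySem.List.pyGetD cs j ' ' ≠ '"' then
      if PySem.List.pyGetD cs j ' ' = '\\' then pvQScan cs fuel (j + 2) else pvQScan cs fuel (j + 1)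
    else j

-- while j < n and text[j] not in ",[]{}:\n\r\t ": j += 1
def pvBScan (cs : List Char) : Nat → Int → Int
  | 0, j => j
  | fuel + 1, j =>
    if j < (cs.length : Int) ∧ PySem.List.pyGetD cs j ' ' ∉ ([',', '[', ']', '{', '}', ':', '\n', '\r', '\t', ' '] : List Char) then
      pvBScan cs fuel (j + 1)
    else j

def parse_score_tok_py (text : String) (i : Int) : Option String × Int :=
  let cs := text.toList
  let n : Int := cs.length
  let i1 := pvSkipWC cs (n - i).toNat i
  if i1 ≥ n then (none, i1)
  else if PySem.List.pyGetD cs i1 ' ' = '"' then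
    let j := pvQScan cs (n - (i1 + 1)).toNat (i1 + 1)
    if j < n then (some (String.ofList (PySem.List.slice cs (some (i1 + 1)) (some j))), j + 1)
    else (none, i1)
  else
    let j := pvBScan cs (n - i1).toNat i1
    let tok := PySem.Chars.strip (PySem.List.slice cs (some i1) (some j))
    (if tok ≠ [] then some (String.ofList tok) else none, j)

-- ===== PORT B =====
-- the code after Source B's while loop (reached when j < n fails / fuel = (n-j).toNat = 0)
def pvLoopBDone (cs : List Char) (n : Int) (j : Int) (state : Int) (start : Int) :
    Option String × Int :=
  if state = 0 then (none, max j n)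
  else if state = 1 then (none, start)
  else
    let tok := PySem.Chars.strip (PySem.List.slice cs (some start) (some n))
    (if tok ≠ [] then some (String.ofList tok) else none, n)

-- the while loop of Source B: j, state (0 skip / 1 quoted / 2 bare), esc, start
def pvLoopB (cs : List Char) (n : Int) : Nat → Int → Int → Bool → Int → Option String × Int
  | fuel + 1, j, state, esc, start =>
    if j < n then
      let c := PySem.List.pyGetD cs j ' '
      if state = 0 then
        if c ∈ ([' ', '\t', '\r', '\n', ','] : List Char) then pvLoopB cs n fuel (j + 1) 0 esc start
        else if c = '"' then pvLoopB cs n fuel (j + 1) 1 esc j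
        else if c ∈ ([',', '[', ']', '{', '}', ':', '\n', '\r', '\t', ' '] : List Char) then (none, j)
        else pvLoopB cs n fuel (j + 1) 2 esc j
      else if state = 1 then
        if esc then pvLoopB cs n fuel (j + 1) 1 false start
        else if c = '\\' then pvLoopB cs n fuel (j + 1) 1 true start
        else if c = '"' then (some (String.ofList (PySem.List.slice cs (some (start + 1)) (some j))), j + 1)
        else pvLoopB cs n fuel (j + 1) 1 esc start
      else
        if c ∈ ([',', '[', ']', '{', '}', ':', '\n', '\r', '\t', ' '] : List Char) then
          let tok := PySem.Chars.strip (PySem.List.slice cs (some start) (some j))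
          (if tok ≠ [] then some (String.ofList tok) else none, j)
        else pvLoopB cs n fuel (j + 1) state esc start
    else pvLoopBDone cs n j state start
  | 0, j, state, _, start => pvLoopBDone cs n j state start

def parse_score_tok_py_alt (text : String) (i : Int) : Option String × Int :=
  let cs := text.toList
  let n : Int := cs.length
  pvLoopB cs n (n - i).toNat i 0 false i

-- ===== PRECONDITION & SPEC =====
-- Pre_ excludes exactly the inputs where A raises IndexError (text[i] with i < -len(text)).
def Pre_parse_score_tok_py (text : String) (i : Int) : Prop := -(PySem.Str.len text) ≤ i
instance (text : String) (i : Int) : Decidable (Pre_parse_score_tok_py text i) := by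
  unfold Pre_parse_score_tok_py; infer_instance

def pvWitness_parse_score_tok_py : String × Int := (" 7,", 0)

def Spec_parse_score_tok_py (text : String) (i : Int) (out : Option String × Int) : Prop := out = parse_score_tok_py_alt text i
instance (text : String) (i : Int) (out : Option String × Int) : Decidable (Spec_parse_score_tok_py text i out) := by unfold Spec_parse_score_tok_py; infer_instance

-- ===== CLAIM (what is proved, stated in full; the proofs are below) =====
def Claim_equal_parse_score_tok_py : Prop := ∀ (text : String) (i : Int), Dom_parse_score_tok_py text i → Pre_parse_score_tok_py text i → Spec_parse_score_tok_py text i (parse_score_tok_py text i)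

-- ===== LEMMAS AND PROOFS =====

theorem pvSkipWC_stop (cs : List Char) :
    ∀ (fuel : Nat) (i : Int), ((cs.length : Int) - i).toNat ≤ fuel →
    ¬ (pvSkipWC cs fuel i < (cs.length : Int) ∧
       PySem.List.pyGetD cs (pvSkipWC cs fuel i) ' ' ∈ ([' ', '\t', '\r', '\n', ','] : List Char)) := by
  intro fuel
  induction fuel with
  | zero =>
      intro i hf
      rw [pvSkipWC]
      intro h
      omega
  | succ fuel ih =>
      intro i hf
      rw [pvSkipWC]
      by_cases h : i < (cs.length : Int) ∧ PySem.List.pyGetD cs i ' ' ∈ ([' ', '\t', '\r', '\n', ','] : List Char)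
      · simp only [if_pos h]
        exact ih (i + 1) (by omega)
      · simp only [if_neg h]
        exact h

-- the state-0 phase of B consumes exactly A's _skip_wc run
theorem pvLoopB_skip (cs : List Char) (e : Bool) (st : Int) :
    ∀ (fuel : Nat) (i : Int), fuel = ((cs.length : Int) - i).toNat →
    pvLoopB cs (cs.length : Int) fuel i 0 e st =
      pvLoopB cs (cs.length : Int) ((cs.length : Int) - pvSkipWC cs fuel i).toNat (pvSkipWC cs fuel i) 0 e st := by
  intro fuel
  induction fuel with
  | zero =>
      intro i hf
      rw [pvSkipWC]
      rw [← hf]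
  | succ fuel ih =>
      intro i hf
      rw [pvSkipWC]
      by_cases h : i < (cs.length : Int) ∧ PySem.List.pyGetD cs i ' ' ∈ ([' ', '\t', '\r', '\n', ','] : List Char)
      · simp only [if_pos h]
        rw [← ih (i + 1) (by omega)]
        rw [pvLoopB]
        simp [h.1, h.2]
      · simp only [if_neg h]
        rw [hf]

-- the state-1 phase of B finds the same closing quote as A's skip-by-2 scan
theorem pvLoopB_quote (cs : List Char) (start : Int) :
    ∀ (fB fA : Nat) (j : Int), fB = ((cs.length : Int) - j).toNat → ((cs.length : Int) - j).toNat ≤ fA →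
    pvLoopB cs (cs.length : Int) fB j 1 false start =
      (if pvQScan cs fA j < (cs.length : Int) then
        (some (String.ofList (PySem.List.slice cs (some (start + 1)) (some (pvQScan cs fA j)))), pvQScan cs fA j + 1)
      else (none, start)) := by
  intro fB
  induction fB using Nat.strong_induction_on with
  | _ fB ih =>
    intro fA j hB hA
    by_cases hj : j < (cs.length : Int)
    · obtain ⟨fB', rfl⟩ : ∃ fB', fB = fB' + 1 := ⟨fB - 1, by omega⟩
      obtain ⟨fA', rfl⟩ : ∃ fA', fA = fA' + 1 := ⟨fA - 1, by omega⟩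
      rw [pvLoopB]
      simp only [if_pos hj]
      by_cases hq : PySem.List.pyGetD cs j ' ' = '"'
      · -- closing quote found here
        have hstop : pvQScan cs (fA' + 1) j = j := by
          rw [pvQScan]; simp [hq]
        rw [hstop]
        simp [hq, hj]
      · by_cases hbs : PySem.List.pyGetD cs j ' ' = '\\'
        · -- escape: A jumps 2, B sets esc then clears it on the next char
          have hAstep : pvQScan cs (fA' + 1) j = pvQScan cs fA' (j + 2) := by
            rw [pvQScan]; simp [hj, hbs]
          rw [hAstep]
          simp only [hbs]
          show pvLoopB cs (cs.length : Int) fB' (j + 1) 1 true start = _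
          by_cases hj1 : j + 1 < (cs.length : Int)
          · obtain ⟨fB'', rfl⟩ : ∃ fB'', fB' = fB'' + 1 := ⟨fB' - 1, by omega⟩
            rw [pvLoopB]
            simp only [if_pos hj1]
            have e2 : j + 1 + 1 = j + 2 := by ring
            simp only [e2]
            rw [ih fB'' (by omega) fA' (j + 2) (by omega) (by omega)]
            simp
          · have hdone : pvLoopB cs (cs.length : Int) fB' (j + 1) 1 true start =
                pvLoopBDone cs (cs.length : Int) (j + 1) 1 start := by
              cases fB' with
              | zero => rw [pvLoopB]
              | succ fB'' => rw [pvLoopB]; simp [hj1]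
            rw [hdone]
            have hA2 : pvQScan cs fA' (j + 2) = j + 2 := by
              cases fA' with
              | zero => rw [pvQScan]
              | succ fA'' => rw [pvQScan]; simp only [if_neg (by omega : ¬ ((j + 2 : Int) < (cs.length : Int) ∧ PySem.List.pyGetD cs (j + 2) ' ' ≠ '"'))]
            rw [hA2]
            simp only [if_neg (by omega : ¬ ((j + 2 : Int) < (cs.length : Int)))]
            rw [pvLoopBDone]
            simp
        · -- ordinary character: both advance by one
          have hAstep : pvQScan cs (fA' + 1) j = pvQScan cs fA' (j + 1) := by
            rw [pvQScan]; simp [hj, hq, hbs]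
          rw [hAstep]
          simp [hq, hbs]
          exact ih fB' (by omega) fA' (j + 1) (by omega) (by omega)
    · -- past the end: unterminated string
      have hdone : pvLoopB cs (cs.length : Int) fB j 1 false start =
          pvLoopBDone cs (cs.length : Int) j 1 start := by
        cases fB with
        | zero => rw [pvLoopB]
        | succ fB' => rw [pvLoopB]; simp [hj]
      have hA0 : pvQScan cs fA j = j := by
        cases fA with
        | zero => rw [pvQScan]
        | succ fA' => rw [pvQScan]; simp [hj]
      rw [hdone, hA0, pvLoopBDone]
      simp [hj]

-- the state-2 phase of B stops at the same index as A's bare-token scan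
theorem pvLoopB_bare (cs : List Char) (start : Int) (e : Bool) :
    ∀ (fuel : Nat) (j : Int), fuel = ((cs.length : Int) - j).toNat → j ≤ (cs.length : Int) →
    pvLoopB cs (cs.length : Int) fuel j 2 e start =
      (let b := pvBScan cs fuel j
       let tok := PySem.Chars.strip (PySem.List.slice cs (some start) (some b))
       (if tok ≠ [] then some (String.ofList tok) else none, b)) := by
  intro fuel
  induction fuel with
  | zero =>
      intro j hf hle
      have hjn : j = (cs.length : Int) := by omega
      rw [pvLoopB, pvBScan, pvLoopBDone]
      subst hjn
      simp
  | succ fuel ih =>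
      intro j hf hle
      have hj : j < (cs.length : Int) := by omega
      rw [pvLoopB, pvBScan]
      simp only [if_pos hj]
      by_cases hstop : PySem.List.pyGetD cs j ' ' ∈ ([',', '[', ']', '{', '}', ':', '\n', '\r', '\t', ' '] : List Char)
      · simp [hstop]
      · simp only [if_neg hstop, if_pos (And.intro hj hstop)]
        exact ih (j + 1) (by omega) (by omega)

theorem slice_self_eq_nil {α : Type} (xs : List α) (a : Int) :
    PySem.List.slice xs (some a) (some a) = [] := by
  apply List.eq_nil_of_length_eq_zero
  rw [PySem.List.length_slice]
  omega

-- ===== VERDICT (by name: the statement is the Claim_ definition above) =====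
theorem parse_score_tok_py_spec : Claim_equal_parse_score_tok_py := by
  intro text i _hDom _hPre
  unfold Spec_parse_score_tok_py parse_score_tok_py parse_score_tok_py_alt
  set cs := text.toList with hcs
  simp only
  rw [pvLoopB_skip cs false i ((cs.length : Int) - i).toNat i rfl]
  set i1 := pvSkipWC cs ((cs.length : Int) - i).toNat i with hi1
  have hstop := pvSkipWC_stop cs ((cs.length : Int) - i).toNat i (le_refl _)
  rw [← hi1] at hstop
  by_cases hend : i1 ≥ (cs.length : Int)
  · have h0 : ((cs.length : Int) - i1).toNat = 0 := by omega
    rw [h0, pvLoopB, pvLoopBDone]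
    simp [hend]
  · have hlt : i1 < (cs.length : Int) := by omega
    have hnws : PySem.List.pyGetD cs i1 ' ' ∉ ([' ', '\t', '\r', '\n', ','] : List Char) := by
      intro hmem; exact hstop ⟨hlt, hmem⟩
    obtain ⟨f, hfeq⟩ : ∃ f, ((cs.length : Int) - i1).toNat = f + 1 :=
      ⟨((cs.length : Int) - i1).toNat - 1, by omega⟩
    rw [hfeq, pvLoopB]
    simp only [if_pos hlt, if_neg hnws]
    by_cases hq : PySem.List.pyGetD cs i1 ' ' = '"'
    · simp only [if_pos hq, if_neg hend]
      rw [pvLoopB_quote cs i1 f ((cs.length : Int) - (i1 + 1)).toNat (i1 + 1) (by omega) (le_refl _)]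
      simp
    · simp only [if_neg hq, if_neg hend]
      by_cases hstop2 : PySem.List.pyGetD cs i1 ' ' ∈ ([',', '[', ']', '{', '}', ':', '\n', '\r', '\t', ' '] : List Char)
      · simp only [if_pos hstop2]
        have hA : pvBScan cs (f + 1) i1 = i1 := by
          rw [pvBScan]; simp [hstop2]
        rw [hA, slice_self_eq_nil]
        simp [PySem.Chars.strip, PySem.Chars.rstrip, PySem.Chars.lstrip]
      · simp only [if_neg hstop2]
        have hA : pvBScan cs (f + 1) i1 = pvBScan cs f (i1 + 1) := by
          rw [pvBScan]; simp only [if_pos (And.intro hlt hstop2)]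
        rw [pvLoopB_bare cs i1 false f (i1 + 1) (by omega) (by omega), hA]
        simp
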